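-- pv_equiv track=rewrite | github.com/markossssssss/basketball-stats-web-tool | cunba_stats/post_rosters.py | match_teams
-- ===== SOURCE A (Python) =====
-- def find_longest_common_substring(s1, s2):
--     """
--     找出两个字符串s1和s2之间的最长公共子串。
--     """
--     m = [[0] * (1 + len(s2)) for i in range(1 + len(s1))]
--     longest, x_longest = 0, 0
--     for x in range(1, 1 + len(s1)):
--         for y in range(1, 1 + len(s2)):
--             if s1[x - 1] == s2[y - 1]:
--                 m[x][y] = m[x - 1][y - 1] + 1
--                 if m[x][y] > longest:
--                     longest = m[x][y]
--                     x_longest = x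
--             else:
--                 m[x][y] = 0
--     return s1[x_longest - longest: x_longest]
--
-- def match_teams(target_teams, teams_from_csv):
--     """
--     为target_teams中的每个队名找出teams_from_csv中的对应名字，
--     匹配规则是最长公共子串。
--     """
--     matches = {}
--     for target_team in target_teams:
--         max_length = 0
--         matched_team = None
--         for team in teams_from_csv:
--             common_substring = find_longest_common_substring(target_team, team)
--             length = len(common_substring)
--             if length > max_length:
--                 max_length = length
--                 matched_team = team
--         if max_length >= 2:
--             matches[target_team] = matched_team
--         else:
--             matches[target_team] = None
--     return matches
-- ===== SOURCE B (Python) =====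
-- def _lcp(a, b):
--     k = 0
--     for x, y in zip(a, b):
--         if x != y:
--             break
--         k += 1
--     return k
--
-- def _score(s1, s2):
--     best = 0
--     for i in range(len(s1)):
--         for j in range(len(s2)):
--             k = _lcp(s1[i:], s2[j:])
--             if k > best:
--                 best = k
--     return best
--
-- def match_teams(target_teams, teams_from_csv):
--     matches = {}
--     for target_team in target_teams:
--         scores = [_score(target_team, team) for team in teams_from_csv]
--         m = max(scores, default=0)
--         matches[target_team] = teams_from_csv[scores.index(m)] if m >= 2 else None
--     return matches
-- ===== Notes on version B (the rewrite author's own statement) =====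
-- stated objective: alternative
-- what changed: Replaces the quadratic common-suffix DP table (and slice reconstruction of the substring) by a direct scan over all start-position pairs counting the forward match run, and replaces A's running-argmax loop over the CSV teams by computing the score list once, taking its max and indexing its first occurrence.
import Mathlib
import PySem

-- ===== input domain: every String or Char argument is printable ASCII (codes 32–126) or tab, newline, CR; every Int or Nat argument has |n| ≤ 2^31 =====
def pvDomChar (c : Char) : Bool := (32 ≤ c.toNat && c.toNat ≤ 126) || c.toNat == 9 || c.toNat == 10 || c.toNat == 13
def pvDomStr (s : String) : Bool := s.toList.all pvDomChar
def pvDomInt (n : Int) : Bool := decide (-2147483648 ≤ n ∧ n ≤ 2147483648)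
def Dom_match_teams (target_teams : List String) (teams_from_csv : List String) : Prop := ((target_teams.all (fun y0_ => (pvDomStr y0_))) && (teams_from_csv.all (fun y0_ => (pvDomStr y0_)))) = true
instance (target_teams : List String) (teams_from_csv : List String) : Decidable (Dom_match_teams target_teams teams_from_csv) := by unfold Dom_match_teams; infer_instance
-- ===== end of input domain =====

-- B replaces A's quadratic common-suffix DP table by a direct scan over start-position
-- pairs counting the forward match run, and replaces A's running-argmax over the CSV
-- teams by a score list + max + first index (objective: alternative, same exact values).

-- ===== PORT A =====
-- m[x][y] read/write on the list-of-lists matrix (indices always in range in A's loops)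
def pvMGet (m : List (List Int)) (x y : Int) : Int :=
  PySem.List.pyGetD (PySem.List.pyGetD m x []) y 0

def pvMSet (m : List (List Int)) (x y : Int) (v : Int) : List (List Int) :=
  PySem.List.pySetD m x (PySem.List.pySetD (PySem.List.pyGetD m x []) y v)

-- m = [[0] * (1 + len(s2)) for i in range(1 + len(s1))]
def pvM0 (s1 s2 : List Char) : List (List Int) :=
  (PySem.List.pyRange 0 (1 + (s1.length : Int)) 1).map
    (fun _ => PySem.List.pyRepeat [(0 : Int)] (1 + (s2.length : Int)))

-- the body of A's inner 'for y in range(1, 1 + len(s2))' loop; state = (m, longest, x_longest)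
def pvInner (s1 s2 : List Char) (x : Int) (st : List (List Int) × Int × Int) (y : Int) :
    List (List Int) × Int × Int :=
  if PySem.List.pyGet? s1 (x - 1) == PySem.List.pyGet? s2 (y - 1) then
    let v := pvMGet st.1 (x - 1) (y - 1) + 1
    let m' := pvMSet st.1 x y v
    if v > st.2.1 then (m', v, x) else (m', st.2.1, st.2.2)
  else (pvMSet st.1 x y 0, st.2.1, st.2.2)

-- find_longest_common_substring, on the code-point lists (exact: Python str ops on its chars)
def pvFlcs (s1 s2 : List Char) : List Char :=
  let st :=
    (PySem.List.pyRange 1 (1 + (s1.length : Int)) 1).foldl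
      (fun st x => (PySem.List.pyRange 1 (1 + (s2.length : Int)) 1).foldl (pvInner s1 s2 x) st)
      (pvM0 s1 s2, (0 : Int), (0 : Int))
  PySem.List.slice s1 (some (st.2.2 - st.2.1)) (some st.2.2)

def match_teams (target_teams : List String) (teams_from_csv : List String) :
    List (String × Option String) :=
  (target_teams.foldl
    (fun (d : PySem.Dict String (Option String)) target_team =>
      let r := teams_from_csv.foldl
        (fun (st : Int × Option String) team =>
          if ((pvFlcs target_team.toList team.toList).length : Int) > st.1 then
            (((pvFlcs target_team.toList team.toList).length : Int), some team)
          else st)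
        ((0 : Int), (none : Option String))
      if r.1 ≥ 2 then d.insert target_team r.2 else d.insert target_team none)
    PySem.Dict.empty).items

-- ===== PORT B =====
-- _lcp: count matching leading pairs of zip(a, b), stop at first mismatch
def pvLcp : List Char → List Char → Int
  | a :: as, b :: bs => if a == b then pvLcp as bs + 1 else 0
  | _, _ => 0

-- _score: best forward match run over all start-position pairs
def pvScore (s1 s2 : List Char) : Int :=
  (PySem.List.pyRange 0 (s1.length : Int) 1).foldl
    (fun best i =>
      (PySem.List.pyRange 0 (s2.length : Int) 1).foldl
        (fun best j =>
          let k := pvLcp (PySem.List.slice s1 (some i) none) (PySem.List.slice s2 (some j) none)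
          if k > best then k else best)
        best)
    0

def match_teams_alt (target_teams : List String) (teams_from_csv : List String) :
    List (String × Option String) :=
  (target_teams.foldl
    (fun (d : PySem.Dict String (Option String)) target_team =>
      let scores := teams_from_csv.map (fun team => pvScore target_team.toList team.toList)
      let m := PySem.List.maxD scores (fun x => x) 0
      d.insert target_team
        (if m ≥ 2 then
          (PySem.List.index? scores m).bind
            (fun idx => PySem.List.pyGet? teams_from_csv (idx : Int))
        else none))
    PySem.Dict.empty).items

-- ===== PRECONDITION & SPEC =====
def Spec_match_teams (target_teams : List String) (teams_from_csv : List String) (out : List (String × Option String)) : Prop := out = match_teams_alt target_teams teams_from_csv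
instance (target_teams : List String) (teams_from_csv : List String) (out : List (String × Option String)) : Decidable (Spec_match_teams target_teams teams_from_csv out) := by unfold Spec_match_teams; infer_instance

-- ===== CLAIM (what is proved, stated in full; the proofs are below) =====
def Claim_equal_match_teams : Prop := ∀ (target_teams : List String) (teams_from_csv : List String), Dom_match_teams target_teams teams_from_csv → Spec_match_teams target_teams teams_from_csv (match_teams target_teams teams_from_csv)

-- ===== LEMMAS AND PROOFS =====

-- ---- basic facts about pvLcp ----
theorem pvLcp_nil_left (b : List Char) : pvLcp [] b = 0 := by cases b <;> rfl

theorem pvLcp_nil_right (a : List Char) : pvLcp a [] = 0 := by cases a <;> rfl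

theorem pvLcp_cons (a b : Char) (as bs : List Char) :
    pvLcp (a :: as) (b :: bs) = if a = b then pvLcp as bs + 1 else 0 := by
  simp [pvLcp]

theorem pvLcp_nonneg : ∀ a b : List Char, 0 ≤ pvLcp a b := by
  intro a
  induction a with
  | nil => intro b; simp [pvLcp_nil_left]
  | cons x xs ih =>
    intro b
    cases b with
    | nil => simp [pvLcp_nil_right]
    | cons y ys =>
      rw [pvLcp_cons]
      split
      · have := ih ys; omega
      · omega

theorem le_pvLcp_iff : ∀ (k : Nat) (a b : List Char),
    (k : Int) ≤ pvLcp a b ↔ (a.take k = b.take k ∧ k ≤ a.length ∧ k ≤ b.length) := by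
  intro k
  induction k with
  | zero =>
    intro a b
    simp [pvLcp_nonneg]
  | succ k ih =>
    intro a b
    cases a with
    | nil =>
      simp only [pvLcp_nil_left, List.length_nil]
      constructor
      · intro h; exfalso; omega
      · intro h; omega
    | cons x xs =>
      cases b with
      | nil =>
        simp only [pvLcp_nil_right, List.length_nil]
        constructor
        · intro h; exfalso; omega
        · intro h; omega
      | cons y ys =>
        rw [pvLcp_cons]
        by_cases hxy : x = y
        · subst hxy
          rw [if_pos rfl]
          simp only [List.take_succ_cons, List.length_cons]
          rw [show ((k + 1 : Nat) : Int) = (k : Int) + 1 by push_cast; ring]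
          constructor
          · intro h
            have hk : (k : Int) ≤ pvLcp xs ys := by omega
            obtain ⟨h1, h2, h3⟩ := (ih xs ys).mp hk
            exact ⟨by rw [h1], by omega, by omega⟩
          · rintro ⟨h1, h2, h3⟩
            have h1' : xs.take k = ys.take k := by injection h1
            have := (ih xs ys).mpr ⟨h1', by omega, by omega⟩
            omega
        · rw [if_neg hxy]
          constructor
          · intro h; exfalso; have : ((k + 1 : Nat) : Int) ≥ 1 := by push_cast; omega
            omega
          · rintro ⟨h1, _, _⟩
            exfalso
            simp only [List.take_succ_cons, List.cons.injEq] at h1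
            exact hxy h1.1

theorem pvLcp_le_left : ∀ a b : List Char, pvLcp a b ≤ (a.length : Int) := by
  intro a
  induction a with
  | nil => intro b; rw [pvLcp_nil_left]; omega
  | cons x xs ih =>
    intro b
    cases b with
    | nil => rw [pvLcp_nil_right]; omega
    | cons y ys =>
      rw [pvLcp_cons]
      have := ih ys
      simp only [List.length_cons]
      split <;> push_cast <;> omega

-- ---- cell / run values ----
-- cellI x y = length of the longest common suffix of s1[:x] and s2[:y] (A's m[x][y])
def cellI (s1 s2 : List Char) (x y : Nat) : Int :=
  pvLcp ((s1.take x).reverse) ((s2.take y).reverse)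

-- runI i j = forward match run from positions i, j (B's _lcp(s1[i:], s2[j:]))
def runI (s1 s2 : List Char) (i j : Nat) : Int := pvLcp (s1.drop i) (s2.drop j)

theorem cellI_zero_left (s1 s2 : List Char) (y : Nat) : cellI s1 s2 0 y = 0 := by
  simp [cellI, pvLcp_nil_left]

theorem cellI_zero_right (s1 s2 : List Char) (x : Nat) : cellI s1 s2 x 0 = 0 := by
  simp [cellI, pvLcp_nil_right]

theorem cellI_le_left (s1 s2 : List Char) (x y : Nat) : cellI s1 s2 x y ≤ (x : Int) := by
  have h := pvLcp_le_left ((s1.take x).reverse) ((s2.take y).reverse)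
  have h2 : ((s1.take x).reverse).length ≤ x := by
    simp [List.length_take]
  unfold cellI
  omega

theorem cellI_succ (s1 s2 : List Char) (x y : Nat) (hx : x < s1.length) (hy : y < s2.length) :
    cellI s1 s2 (x + 1) (y + 1) = if s1[x] = s2[y] then cellI s1 s2 x y + 1 else 0 := by
  unfold cellI
  rw [List.take_add_one, List.take_add_one, List.getElem?_eq_getElem hx,
    List.getElem?_eq_getElem hy]
  simp only [Option.toList_some, List.reverse_append, List.reverse_cons, List.reverse_nil,
    List.nil_append, List.singleton_append]
  rw [pvLcp_cons]

-- reversed prefixes vs segments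
theorem seg_rev (s : List Char) (x c : Nat) (hc : c ≤ x) (hx : x ≤ s.length) :
    ((s.take x).reverse).take c = ((s.drop (x - c)).take c).reverse := by
  rw [List.take_reverse]
  rw [List.length_take]
  have h1 : min x s.length = x := by omega
  rw [h1, List.drop_take]
  have h2 : x - (x - c) = c := by omega
  rw [h2]

-- ---- the DP matrix spec ----
def mvalI (s1 s2 : List Char) (X Y x y : Nat) : Int :=
  if 1 ≤ x ∧ 1 ≤ y ∧ (x < X ∨ (x = X ∧ y ≤ Y)) then cellI s1 s2 x y else 0

def mspec (s1 s2 : List Char) (X Y : Nat) : List (List Int) :=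
  (List.range (s1.length + 1)).map
    (fun x => (List.range (s2.length + 1)).map (fun y => mvalI s1 s2 X Y x y))

theorem m0_eq (s1 s2 : List Char) : pvM0 s1 s2 = mspec s1 s2 0 s2.length := by
  have hm : ∀ x y : Nat, mvalI s1 s2 0 s2.length x y = 0 := by
    intro x y; unfold mvalI; rw [if_neg (by omega)]
  unfold pvM0 mspec
  simp only [hm, List.map_const', List.length_range, PySem.List.pyRepeat_singleton,
    PySem.List.length_pyRange_one]
  have e1 : ((1 : Int) + (s1.length : Int) - 0).toNat = s1.length + 1 := by omega
  have e2 : ((1 : Int) + (s2.length : Int)).toNat = s2.length + 1 := by omega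
  rw [e1, e2]

theorem mspec_row (s1 s2 : List Char) (X : Nat) :
    mspec s1 s2 X s2.length = mspec s1 s2 (X + 1) 0 := by
  unfold mspec
  apply List.map_congr_left
  intro x _
  apply List.map_congr_left
  intro y hy
  have hy' : y ≤ s2.length := by
    have := List.mem_range.mp hy; omega
  unfold mvalI
  exact if_congr (by omega) rfl rfl

theorem pvGetDMapRange {α : Type} (f : Nat → α) (n i : Nat) (d : α) (hi : i < n) :
    ((List.range n).map f).getD i d = f i := by
  have hlen : i < ((List.range n).map f).length := by simpa using hi
  rw [List.getD_eq_getElem _ _ hlen, List.getElem_map, List.getElem_range]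

theorem mget_read (s1 s2 : List Char) (X Y x y : Nat) (hx : x ≤ s1.length) (hy : y ≤ s2.length) :
    pvMGet (mspec s1 s2 X Y) (x : Int) (y : Int) = mvalI s1 s2 X Y x y := by
  unfold pvMGet mspec
  simp only [PySem.List.pyGetD_natCast]
  rw [pvGetDMapRange _ _ _ _ (by omega), pvGetDMapRange _ _ _ _ (by omega)]

theorem mval_prev (s1 s2 : List Char) (X Y : Nat) (hX1 : 1 ≤ X) :
    mvalI s1 s2 X Y (X - 1) Y = cellI s1 s2 (X - 1) Y := by
  unfold mvalI
  by_cases h1 : X - 1 = 0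
  · rw [if_neg (by omega), h1, cellI_zero_left]
  · by_cases h2 : Y = 0
    · rw [if_neg (by omega), h2, cellI_zero_right]
    · rw [if_pos (by omega)]

theorem mset_step (s1 s2 : List Char) (X Y : Nat) (hX1 : 1 ≤ X) (hX2 : X ≤ s1.length)
    (_hY : Y < s2.length) :
    pvMSet (mspec s1 s2 X Y) (X : Int) ((Y : Int) + 1) (cellI s1 s2 X (Y + 1))
      = mspec s1 s2 X (Y + 1) := by
  have hcast : ((Y : Int) + 1) = ((Y + 1 : Nat) : Int) := by push_cast; ring
  unfold pvMSet
  rw [hcast, PySem.List.pyGetD_natCast, PySem.List.pySetD_natCast, PySem.List.pySetD_natCast]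
  have hrow : (mspec s1 s2 X Y).getD X []
      = (List.range (s2.length + 1)).map (fun y => mvalI s1 s2 X Y X y) := by
    unfold mspec
    rw [List.getD_eq_getElem _ _ (by simp; omega)]
    simp only [List.getElem_map, List.getElem_range]
  rw [hrow]
  apply List.ext_getElem
  · simp [mspec]
  · intro i hi1 hi2
    rw [List.getElem_set]
    by_cases hiX : X = i
    · rw [if_pos hiX]
      subst hiX
      have hrhs : (mspec s1 s2 X (Y + 1))[X]'hi2
          = (List.range (s2.length + 1)).map (fun y => mvalI s1 s2 X (Y + 1) X y) := by
        unfold mspec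
        simp only [List.getElem_map, List.getElem_range]
      rw [hrhs]
      apply List.ext_getElem
      · simp
      · intro j hj1 hj2
        rw [List.getElem_set]
        by_cases hjY : Y + 1 = j
        · rw [if_pos hjY]
          subst hjY
          simp only [List.getElem_map, List.getElem_range]
          unfold mvalI
          rw [if_pos (by omega)]
        · rw [if_neg hjY]
          simp only [List.getElem_map, List.getElem_range]
          have hj' : j ≤ s2.length := by
            simp at hj1; omega
          unfold mvalI
          exact if_congr (by omega) rfl rfl
    · rw [if_neg hiX]
      unfold mspec
      simp only [List.getElem_map, List.getElem_range]
      apply List.map_congr_left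
      intro y _
      unfold mvalI
      exact if_congr (by omega) rfl rfl

-- ---- the loop invariant ----
def ProcI (n2 X Y x y : Nat) : Prop :=
  1 ≤ x ∧ 1 ≤ y ∧ ((x < X ∧ y ≤ n2) ∨ (x = X ∧ y ≤ Y))

def GoodI (s1 s2 : List Char) (X Y : Nat) (l xl : Int) : Prop :=
  0 ≤ l ∧ l ≤ xl ∧ xl ≤ (s1.length : Int) ∧
  (∀ x y : Nat, ProcI s2.length X Y x y → cellI s1 s2 x y ≤ l) ∧
  (l = 0 ∨ ∃ x y : Nat, ProcI s2.length X Y x y ∧ cellI s1 s2 x y = l)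

theorem proc_succ (n2 X Y x y : Nat) (hX : 1 ≤ X) :
    ProcI n2 X (Y + 1) x y ↔ ProcI n2 X Y x y ∨ (x = X ∧ y = Y + 1) := by
  unfold ProcI; omega

theorem proc_row (n2 X x y : Nat) : ProcI n2 X n2 x y ↔ ProcI n2 (X + 1) 0 x y := by
  unfold ProcI; omega

theorem good_row (s1 s2 : List Char) (X : Nat) (l xl : Int)
    (h : GoodI s1 s2 X s2.length l xl) : GoodI s1 s2 (X + 1) 0 l xl := by
  obtain ⟨h1, h2, h3, h4, h5⟩ := h
  refine ⟨h1, h2, h3, ?_, ?_⟩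
  · intro x y hp; exact h4 x y ((proc_row _ _ _ _).mpr hp)
  · rcases h5 with h5 | ⟨x, y, hp, hc⟩
    · exact Or.inl h5
    · exact Or.inr ⟨x, y, (proc_row _ _ _ _).mp hp, hc⟩

theorem good_step_hi (s1 s2 : List Char) (X Y : Nat) (l xl : Int)
    (hX1 : 1 ≤ X) (hX2 : X ≤ s1.length)
    (h : GoodI s1 s2 X Y l xl) (hc : cellI s1 s2 X (Y + 1) > l) :
    GoodI s1 s2 X (Y + 1) (cellI s1 s2 X (Y + 1)) (X : Int) := by
  obtain ⟨h1, h2, h3, h4, h5⟩ := h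
  refine ⟨by omega, cellI_le_left s1 s2 X (Y + 1), by exact_mod_cast Nat.cast_le.mpr hX2, ?_, ?_⟩
  · intro x y hp
    rcases (proc_succ _ _ _ _ _ hX1).mp hp with hp | ⟨hx, hy⟩
    · have := h4 x y hp; omega
    · subst hx; subst hy; omega
  · exact Or.inr ⟨X, Y + 1, (proc_succ _ _ _ _ _ hX1).mpr (Or.inr ⟨rfl, rfl⟩), rfl⟩

theorem good_step_lo (s1 s2 : List Char) (X Y : Nat) (l xl : Int) (hX1 : 1 ≤ X)
    (h : GoodI s1 s2 X Y l xl) (hc : cellI s1 s2 X (Y + 1) ≤ l) :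
    GoodI s1 s2 X (Y + 1) l xl := by
  obtain ⟨h1, h2, h3, h4, h5⟩ := h
  refine ⟨h1, h2, h3, ?_, ?_⟩
  · intro x y hp
    rcases (proc_succ _ _ _ _ _ hX1).mp hp with hp | ⟨hx, hy⟩
    · exact h4 x y hp
    · subst hx; subst hy; exact hc
  · rcases h5 with h5 | ⟨x, y, hp, hcc⟩
    · exact Or.inl h5
    · exact Or.inr ⟨x, y, (proc_succ _ _ _ _ _ hX1).mpr (Or.inl hp), hcc⟩

theorem inner_step (s1 s2 : List Char) (X Y : Nat) (hX1 : 1 ≤ X) (hX2 : X ≤ s1.length)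
    (hY : Y < s2.length) (l xl : Int) (h : GoodI s1 s2 X Y l xl) :
    ∃ l' xl', pvInner s1 s2 (X : Int) (mspec s1 s2 X Y, l, xl) ((Y : Int) + 1)
        = (mspec s1 s2 X (Y + 1), l', xl') ∧ GoodI s1 s2 X (Y + 1) l' xl' := by
  have hX1n : X - 1 < s1.length := by omega
  have hstep : pvInner s1 s2 (X : Int) (mspec s1 s2 X Y, l, xl) ((Y : Int) + 1)
      = (mspec s1 s2 X (Y + 1),
         if cellI s1 s2 X (Y + 1) > l then cellI s1 s2 X (Y + 1) else l,
         if cellI s1 s2 X (Y + 1) > l then (X : Int) else xl) := by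
    unfold pvInner
    try dsimp only
    rw [show (X : Int) - 1 = ((X - 1 : Nat) : Int) by omega]
    rw [show (Y : Int) + 1 - 1 = ((Y : Nat) : Int) by ring]
    rw [PySem.List.pyGet?_natCast, PySem.List.pyGet?_natCast,
      List.getElem?_eq_getElem hX1n, List.getElem?_eq_getElem hY,
      mget_read s1 s2 X Y (X - 1) Y (by omega) (by omega), mval_prev s1 s2 X Y hX1]
    by_cases hc : s1[X - 1]'hX1n = s2[Y]'hY
    · rw [if_pos (by simp [hc])]
      have hv : cellI s1 s2 (X - 1) Y + 1 = cellI s1 s2 X (Y + 1) := by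
        have hrec := cellI_succ s1 s2 (X - 1) Y hX1n hY
        rw [if_pos hc] at hrec
        rw [show X - 1 + 1 = X by omega] at hrec
        omega
      rw [hv, mset_step s1 s2 X Y hX1 hX2 hY]
      split_ifs with hgt <;> rfl
    · rw [if_neg (by simp [hc])]
      have h0 : cellI s1 s2 X (Y + 1) = 0 := by
        have hrec := cellI_succ s1 s2 (X - 1) Y hX1n hY
        rw [if_neg hc] at hrec
        rw [show X - 1 + 1 = X by omega] at hrec
        exact hrec
      conv_lhs => rw [show (0 : Int) = cellI s1 s2 X (Y + 1) from h0.symm]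
      rw [mset_step s1 s2 X Y hX1 hX2 hY]
      have hng : ¬ cellI s1 s2 X (Y + 1) > l := by
        have := h.1; omega
      rw [if_neg hng, if_neg hng]
  by_cases hgt : cellI s1 s2 X (Y + 1) > l
  · refine ⟨cellI s1 s2 X (Y + 1), (X : Int), ?_, good_step_hi s1 s2 X Y l xl hX1 hX2 h hgt⟩
    rw [hstep, if_pos hgt, if_pos hgt]
  · refine ⟨l, xl, ?_, good_step_lo s1 s2 X Y l xl hX1 h (by omega)⟩
    rw [hstep, if_neg hgt, if_neg hgt]

theorem inner_loop (s1 s2 : List Char) (X : Nat) (hX1 : 1 ≤ X) (hX2 : X ≤ s1.length)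
    (l0 xl0 : Int) (h0 : GoodI s1 s2 X 0 l0 xl0) :
    ∀ Y : Nat, Y ≤ s2.length →
      ∃ l xl, (PySem.List.pyRange 1 ((Y : Int) + 1) 1).foldl (pvInner s1 s2 (X : Int))
            (mspec s1 s2 X 0, l0, xl0)
          = (mspec s1 s2 X Y, l, xl) ∧ GoodI s1 s2 X Y l xl := by
  intro Y
  induction Y with
  | zero =>
    intro _
    refine ⟨l0, xl0, ?_, h0⟩
    rw [show ((0 : Nat) : Int) + 1 = 1 by norm_num, PySem.List.pyRange_one_eq_nil (le_refl 1)]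
    rfl
  | succ Y ih =>
    intro hY
    obtain ⟨l, xl, heq, hg⟩ := ih (by omega)
    have hr : PySem.List.pyRange 1 (((Y + 1 : Nat) : Int) + 1) 1
        = PySem.List.pyRange 1 ((Y : Int) + 1) 1 ++ [(Y : Int) + 1] := by
      rw [show ((Y + 1 : Nat) : Int) + 1 = ((Y : Int) + 1) + 1 by push_cast; ring,
        PySem.List.pyRange_one_succ_right (by omega)]
    rw [hr, List.foldl_append, heq]
    simp only [List.foldl_cons, List.foldl_nil]
    exact inner_step s1 s2 X Y hX1 hX2 (by omega) l xl hg

theorem outer_loop (s1 s2 : List Char) :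
    ∀ X : Nat, X ≤ s1.length →
      ∃ l xl, (PySem.List.pyRange 1 ((X : Int) + 1) 1).foldl
            (fun st x =>
              (PySem.List.pyRange 1 (1 + (s2.length : Int)) 1).foldl (pvInner s1 s2 x) st)
            (pvM0 s1 s2, (0 : Int), (0 : Int))
          = (mspec s1 s2 X s2.length, l, xl) ∧ GoodI s1 s2 X s2.length l xl := by
  intro X
  induction X with
  | zero =>
    intro _
    refine ⟨0, 0, ?_, ?_⟩
    · rw [show ((0 : Nat) : Int) + 1 = 1 by norm_num, PySem.List.pyRange_one_eq_nil (le_refl 1)]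
      simp only [List.foldl_nil]
      rw [m0_eq]
    · refine ⟨le_refl 0, le_refl 0, by positivity, ?_, Or.inl rfl⟩
      intro x y hp
      exfalso
      unfold ProcI at hp
      omega
  | succ X ih =>
    intro hX
    obtain ⟨l, xl, heq, hg⟩ := ih (by omega)
    have hr : PySem.List.pyRange 1 (((X + 1 : Nat) : Int) + 1) 1
        = PySem.List.pyRange 1 ((X : Int) + 1) 1 ++ [(X : Int) + 1] := by
      rw [show ((X + 1 : Nat) : Int) + 1 = ((X : Int) + 1) + 1 by push_cast; ring,
        PySem.List.pyRange_one_succ_right (by omega)]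
    rw [hr, List.foldl_append, heq]
    simp only [List.foldl_cons, List.foldl_nil]
    rw [show (1 : Int) + (s2.length : Int) = (s2.length : Int) + 1 by ring]
    rw [show (X : Int) + 1 = ((X + 1 : Nat) : Int) by push_cast; ring]
    rw [mspec_row]
    exact inner_loop s1 s2 (X + 1) (by omega) (by omega) l xl
      (good_row s1 s2 X l xl hg) s2.length (le_refl _)

-- ---- B's nested maximum ----
theorem fold_sel_max (g : Int → Int) : ∀ (lj : List Int) (b : Int),
    b ≤ lj.foldl (fun acc j => if g j > acc then g j else acc) b ∧
    (∀ j ∈ lj, g j ≤ lj.foldl (fun acc j => if g j > acc then g j else acc) b) ∧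
    (lj.foldl (fun acc j => if g j > acc then g j else acc) b = b ∨
      ∃ j ∈ lj, lj.foldl (fun acc j => if g j > acc then g j else acc) b = g j) := by
  intro lj
  induction lj with
  | nil => intro b; simp
  | cons j js ih =>
    intro b
    simp only [List.foldl_cons]
    obtain ⟨h1, h2, h3⟩ := ih (if g j > b then g j else b)
    have hbb' : b ≤ (if g j > b then g j else b) := by split <;> omega
    have hjb' : g j ≤ (if g j > b then g j else b) := by split <;> omega
    refine ⟨by omega, ?_, ?_⟩
    · intro j' hj'
      rcases List.mem_cons.mp hj' with h | h
      · subst h; omega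
      · exact h2 j' h
    · rcases h3 with h | ⟨j', hj', hval⟩
      · rw [h]
        by_cases hgt : g j > b
        · rw [if_pos hgt]
          exact Or.inr ⟨j, List.mem_cons_self, rfl⟩
        · rw [if_neg hgt]
          exact Or.inl rfl
      · exact Or.inr ⟨j', List.mem_cons_of_mem _ hj', hval⟩

theorem fold_sel_max2 (f : Int → Int → Int) : ∀ (li lj : List Int) (b : Int),
    b ≤ li.foldl (fun acc i => lj.foldl (fun acc2 j => if f i j > acc2 then f i j else acc2) acc) b ∧
    (∀ i ∈ li, ∀ j ∈ lj, f i j ≤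
      li.foldl (fun acc i => lj.foldl (fun acc2 j => if f i j > acc2 then f i j else acc2) acc) b) ∧
    (li.foldl (fun acc i => lj.foldl (fun acc2 j => if f i j > acc2 then f i j else acc2) acc) b = b ∨
      ∃ i ∈ li, ∃ j ∈ lj,
        li.foldl (fun acc i => lj.foldl (fun acc2 j => if f i j > acc2 then f i j else acc2) acc) b = f i j) := by
  intro li
  induction li with
  | nil => intro lj b; simp
  | cons i is ih =>
    intro lj b
    simp only [List.foldl_cons]
    obtain ⟨k1, k2, k3⟩ := fold_sel_max (f i) lj b
    obtain ⟨h1, h2, h3⟩ := ih lj (lj.foldl (fun acc2 j => if f i j > acc2 then f i j else acc2) b)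
    refine ⟨le_trans k1 h1, ?_, ?_⟩
    · intro i' hi' j' hj'
      rcases List.mem_cons.mp hi' with h | h
      · subst h; exact le_trans (k2 j' hj') h1
      · exact h2 i' h j' hj'
    · rcases h3 with h | ⟨i', hi', j', hj', hval⟩
      · rcases k3 with k | ⟨j', hj', kval⟩
        · exact Or.inl (by rw [h, k])
        · exact Or.inr ⟨i, List.mem_cons_self, j', hj', by rw [h, kval]⟩
      · exact Or.inr ⟨i', List.mem_cons_of_mem _ hi', j', hj', hval⟩

def RunMax (s1 s2 : List Char) (B : Int) : Prop :=
  0 ≤ B ∧ (∀ i j : Nat, i < s1.length → j < s2.length → runI s1 s2 i j ≤ B) ∧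
  (B = 0 ∨ ∃ i j : Nat, i < s1.length ∧ j < s2.length ∧ runI s1 s2 i j = B)

theorem score_runmax (s1 s2 : List Char) : RunMax s1 s2 (pvScore s1 s2) := by
  have hslice : ∀ (s : List Char) (n : Nat), PySem.List.slice s (some ((n : Nat) : Int)) none
      = s.drop n := by
    intro s n
    rw [PySem.List.slice_from _ (by positivity)]
    simp
  obtain ⟨h1, h2, h3⟩ := fold_sel_max2
    (fun i j => pvLcp (PySem.List.slice s1 (some i) none) (PySem.List.slice s2 (some j) none))
    (PySem.List.pyRange 0 (s1.length : Int) 1) (PySem.List.pyRange 0 (s2.length : Int) 1) 0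
  refine ⟨?_, ?_, ?_⟩
  · exact h1
  · intro i j hi hj
    have hmi : ((i : Nat) : Int) ∈ PySem.List.pyRange 0 (s1.length : Int) 1 :=
      PySem.List.mem_pyRange_one.mpr ⟨by positivity, by exact_mod_cast hi⟩
    have hmj : ((j : Nat) : Int) ∈ PySem.List.pyRange 0 (s2.length : Int) 1 :=
      PySem.List.mem_pyRange_one.mpr ⟨by positivity, by exact_mod_cast hj⟩
    have hb := h2 (i : Int) hmi (j : Int) hmj
    rw [hslice, hslice] at hb
    exact hb
  · rcases h3 with h | ⟨i, hi, j, hj, hval⟩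
    · exact Or.inl h
    · right
      obtain ⟨hi0, hi1⟩ := PySem.List.mem_pyRange_one.mp hi
      obtain ⟨hj0, hj1⟩ := PySem.List.mem_pyRange_one.mp hj
      refine ⟨i.toNat, j.toNat, by omega, by omega, ?_⟩
      rw [show i = ((i.toNat : Nat) : Int) by omega, show j = ((j.toNat : Nat) : Int) by omega,
        hslice, hslice] at hval
      exact hval.symm

-- ---- bridge: the two maxima agree ----
theorem cell_to_run (s1 s2 : List Char) (x y c : Nat) (_hx1 : 1 ≤ x) (hx : x ≤ s1.length)
    (_hy1 : 1 ≤ y) (hy : y ≤ s2.length) (hc1 : 1 ≤ c) (h : (c : Int) ≤ cellI s1 s2 x y) :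
    (c : Int) ≤ runI s1 s2 (x - c) (y - c) ∧ c ≤ x ∧ c ≤ y := by
  unfold cellI at h
  obtain ⟨hseg, hlen1, hlen2⟩ := (le_pvLcp_iff c _ _).mp h
  have hcx : c ≤ x := by
    simp [List.length_take] at hlen1; omega
  have hcy : c ≤ y := by
    simp [List.length_take] at hlen2; omega
  rw [seg_rev s1 x c hcx hx, seg_rev s2 y c hcy hy] at hseg
  have hseg' : (s1.drop (x - c)).take c = (s2.drop (y - c)).take c :=
    List.reverse_injective hseg
  refine ⟨?_, hcx, hcy⟩
  unfold runI
  rw [le_pvLcp_iff]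
  refine ⟨hseg', ?_, ?_⟩
  · rw [List.length_drop]; omega
  · rw [List.length_drop]; omega

theorem run_to_cell (s1 s2 : List Char) (i j t : Nat) (hi : i < s1.length) (hj : j < s2.length)
    (_ht1 : 1 ≤ t) (h : (t : Int) ≤ runI s1 s2 i j) :
    (t : Int) ≤ cellI s1 s2 (i + t) (j + t) ∧ i + t ≤ s1.length ∧ j + t ≤ s2.length := by
  unfold runI at h
  obtain ⟨hseg, hlen1, hlen2⟩ := (le_pvLcp_iff t _ _).mp h
  rw [List.length_drop] at hlen1
  rw [List.length_drop] at hlen2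
  refine ⟨?_, by omega, by omega⟩
  unfold cellI
  rw [le_pvLcp_iff]
  refine ⟨?_, ?_, ?_⟩
  · rw [seg_rev s1 (i + t) t (by omega) (by omega), seg_rev s2 (j + t) t (by omega) (by omega)]
    rw [show i + t - t = i by omega, show j + t - t = j by omega]
    exact congrArg List.reverse hseg
  · simp [List.length_take]; omega
  · simp [List.length_take]; omega

theorem cellmax_eq_runmax (s1 s2 : List Char) (l xl B : Int)
    (hg : GoodI s1 s2 s1.length s2.length l xl) (hr : RunMax s1 s2 B) : l = B := by
  obtain ⟨hg0, hgxl, hgn, hgb, hgw⟩ := hg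
  obtain ⟨hr0, hrb, hrw⟩ := hr
  apply le_antisymm
  · rcases hgw with h | ⟨x, y, hp, hc⟩
    · omega
    · by_cases hl : l ≤ 0
      · omega
      · obtain ⟨hx1, hy1, hd⟩ := hp
        have hxn : x ≤ s1.length := by omega
        have hyn : y ≤ s2.length := by omega
        have hcl : ((l.toNat : Nat) : Int) ≤ cellI s1 s2 x y := by
          rw [Int.toNat_of_nonneg hg0]; omega
        obtain ⟨hrun, hcx, hcy⟩ :=
          cell_to_run s1 s2 x y l.toNat hx1 hxn hy1 hyn (by omega) hcl
        have hb := hrb (x - l.toNat) (y - l.toNat) (by omega) (by omega)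
        omega
  · rcases hrw with h | ⟨i, j, hi, hj, hrunv⟩
    · omega
    · by_cases hb : B ≤ 0
      · omega
      · have hrl : ((B.toNat : Nat) : Int) ≤ runI s1 s2 i j := by
          rw [Int.toNat_of_nonneg hr0]; omega
        obtain ⟨hcell, hin, hjn⟩ := run_to_cell s1 s2 i j B.toNat hi hj (by omega) hrl
        have hbnd := hgb (i + B.toNat) (j + B.toNat) ⟨by omega, by omega, by omega⟩
        omega

theorem flcs_len (s1 s2 : List Char) : ((pvFlcs s1 s2).length : Int) = pvScore s1 s2 := by
  obtain ⟨l, xl, heq, hg⟩ := outer_loop s1 s2 s1.length (le_refl _)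
  unfold pvFlcs
  rw [show (1 : Int) + (s1.length : Int) = (s1.length : Int) + 1 by ring]
  rw [heq]
  try dsimp only
  have hg0 := hg.1
  have hgxl := hg.2.1
  have hgn := hg.2.2.1
  rw [PySem.List.slice_toNat s1 (by omega) (by omega)]
  have hlen : (List.take (xl.toNat - (xl - l).toNat) (List.drop (xl - l).toNat s1)).length
      = l.toNat := by
    simp only [List.length_take, List.length_drop]
    omega
  rw [hlen, Int.toNat_of_nonneg hg0]
  exact cellmax_eq_runmax s1 s2 l xl _ hg (score_runmax s1 s2)

theorem pvScore_nonneg (s1 s2 : List Char) : 0 ≤ pvScore s1 s2 :=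
  (score_runmax s1 s2).1

-- ---- selection over the CSV teams ----
theorem foldl_max_sel (sc : String → Int) : ∀ (l : List String) (b : Int) (mt : Option String),
    l.foldl (fun st team => if sc team > st.1 then (sc team, some team) else st) (b, mt)
      = (l.foldl (fun a x => max a (sc x)) b,
         if b < l.foldl (fun a x => max a (sc x)) b then
           l.find? (fun x => sc x == l.foldl (fun a x => max a (sc x)) b)
         else mt) := by
  intro l
  induction l with
  | nil => intro b mt; simp
  | cons x xs ih =>
    intro b mt
    simp only [List.foldl_cons]
    try dsimp only
    by_cases hb : sc x > b
    · rw [if_pos hb, ih (sc x) (some x), show max b (sc x) = sc x by omega]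
      have hle := (PySem.List.le_foldl_max_int xs sc (sc x)).1
      have hbM : b < xs.foldl (fun a x => max a (sc x)) (sc x) := by omega
      rw [if_pos hbM]
      congr 1
      by_cases hxM : sc x = xs.foldl (fun a x => max a (sc x)) (sc x)
      · rw [if_neg (by omega), List.find?_cons_of_pos (by exact beq_iff_eq.mpr hxM)]
      · rw [if_pos (by omega), List.find?_cons_of_neg (by simp only [beq_iff_eq]; exact hxM)]
    · rw [if_neg hb, ih b mt, show max b (sc x) = b by omega]
      congr 1
      by_cases hbM : b < xs.foldl (fun a x => max a (sc x)) b
      · rw [if_pos hbM, if_pos hbM,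
          List.find?_cons_of_neg (by simp only [beq_iff_eq]; omega)]
      · rw [if_neg hbM, if_neg hbM]

theorem maxD_eq (sc : String → Int) (l : List String) (h : ∀ x ∈ l, 0 ≤ sc x) :
    PySem.List.maxD (l.map sc) (fun x => x) 0 = l.foldl (fun a x => max a (sc x)) 0 := by
  unfold PySem.List.maxD
  cases h' : PySem.List.max? (l.map sc) (fun x => x) with
  | none =>
    have hnil : l.map sc = [] := (PySem.List.max?_eq_none_iff _ _).mp h'
    have : l = [] := List.map_eq_nil_iff.mp hnil
    subst this
    rfl
  | some m =>
    have hmem : m ∈ l.map sc := PySem.List.max?_mem h'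
    have hmax : ∀ y ∈ l.map sc, y ≤ m := fun y hy => PySem.List.max?_isMax h' y hy
    have hm0 : 0 ≤ m := by
      obtain ⟨z, hz, hzm⟩ := List.mem_map.mp hmem
      have := h z hz; omega
    have hF : l.foldl (fun a x => max a (sc x)) 0 = (l.map sc).foldl max 0 := by
      rw [List.foldl_map]
    rw [hF]
    have h1 := (PySem.List.le_foldl_max (l.map sc) 0).2
    have h2 := PySem.List.foldl_max_mem (l.map sc) 0
    have hle1 : m ≤ (l.map sc).foldl max 0 := h1 m hmem
    have hle2 : (l.map sc).foldl max 0 ≤ m := by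
      rcases h2 with h2 | h2
      · omega
      · exact hmax _ h2
    simp only [Option.getD_some]
    omega

theorem index_bind_eq_find (sc : String → Int) : ∀ (l : List String) (m : Int),
    (PySem.List.index? (l.map sc) m).bind (fun idx => PySem.List.pyGet? l (idx : Int))
      = l.find? (fun x => sc x == m) := by
  intro l
  induction l with
  | nil => intro m; rfl
  | cons x xs ih =>
    intro m
    simp only [List.map_cons, PySem.List.index?, List.idxOf?, List.findIdx?_cons]
    by_cases hx : sc x = m
    · rw [if_pos (by exact beq_iff_eq.mpr hx)]
      rw [List.find?_cons_of_pos (by exact beq_iff_eq.mpr hx)]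
      simp [PySem.List.pyGet?_natCast]
    · rw [if_neg (by simp only [beq_iff_eq]; exact hx)]
      rw [List.find?_cons_of_neg (by simp only [beq_iff_eq]; exact hx)]
      have hbm : ∀ (o : Option Nat) (g : Nat → Option String),
          (o.map (fun i => i + 1)).bind g = o.bind (fun n => g (n + 1)) := by
        intro o g; cases o <;> rfl
      rw [hbm]
      have ih' := ih m
      simp only [PySem.List.index?, List.idxOf?] at ih'
      rw [← ih']
      cases hfo : List.findIdx? (fun z => z == m) (xs.map sc) with
      | none => rfl
      | some n =>
        show PySem.List.pyGet? (x :: xs) ((n + 1 : Nat) : Int) = PySem.List.pyGet? xs (n : Nat)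
        rw [PySem.List.pyGet?_natCast, PySem.List.pyGet?_natCast, List.getElem?_cons_succ]

theorem per_target (csv : List String) (t : String) (d : PySem.Dict String (Option String)) :
    (let r := csv.foldl
        (fun (st : Int × Option String) team =>
          if ((pvFlcs t.toList team.toList).length : Int) > st.1 then
            (((pvFlcs t.toList team.toList).length : Int), some team)
          else st)
        ((0 : Int), (none : Option String))
     if r.1 ≥ 2 then d.insert t r.2 else d.insert t none)
      = d.insert t
          (if PySem.List.maxD (csv.map (fun team => pvScore t.toList team.toList)) (fun x => x) 0 ≥ 2 then
            (PySem.List.index? (csv.map (fun team => pvScore t.toList team.toList))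
                (PySem.List.maxD (csv.map (fun team => pvScore t.toList team.toList)) (fun x => x) 0)).bind
              (fun idx => PySem.List.pyGet? csv (idx : Int))
          else none) := by
  have hM := foldl_max_sel (fun team => pvScore t.toList team.toList) csv 0 none
  simp only [flcs_len, hM,
    maxD_eq (fun team => pvScore t.toList team.toList) csv
      (fun z _ => pvScore_nonneg t.toList z.toList),
    index_bind_eq_find (fun team => pvScore t.toList team.toList) csv]
  try dsimp only
  split_ifs with h1 h2 <;> first | rfl | omega

-- ===== VERDICT (by name: the statement is the Claim_ definition above) =====
theorem match_teams_spec : Claim_equal_match_teams := by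
  intro targets csv _
  unfold Spec_match_teams match_teams match_teams_alt
  refine congrArg PySem.Dict.items ?_
  refine PySem.List.foldl_congr_mem targets _ _ _ ?_
  intro d t _
  exact per_target csv t d
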